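-- pv_equiv track=rewrite | github.com/ruben-vl/Programming-1-Oplossingen | Oplossingen van Jialin/12. Lists/fruitmand.py | maak_fruitmand
-- ===== SOURCE A (Python) =====
-- def maak_fruitmand(fruit_arr):
--     fruitmand = []
--     for fruit in fruit_arr:
--         for element in fruitmand:
--             if len(fruit) == len(element):
--                 fruitmand.remove(element)
--                 fruitmand.append(fruit)
--                 # (overbodig:) fruitmand = list(map(lambda x: x.replace(element, fruit), fruitmand))
--         if fruit not in fruitmand:
--             fruitmand.append(fruit)
--     fruitmand.sort(key=lambda x: len(x))
--     return fruitmand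
-- ===== SOURCE B (Python) =====
-- def maak_fruitmand(fruit_arr):
--     laatste = {}
--     for fruit in fruit_arr:
--         laatste[len(fruit)] = fruit
--     return sorted(laatste.values(), key=len)
-- ===== Notes on version B (the rewrite author's own statement) =====
-- stated objective: faster
-- what changed: replaced A's quadratic scan-with-remove/append list maintenance by a dict keyed by length (last fruit per length wins) followed by one sort of its values
import Mathlib
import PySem

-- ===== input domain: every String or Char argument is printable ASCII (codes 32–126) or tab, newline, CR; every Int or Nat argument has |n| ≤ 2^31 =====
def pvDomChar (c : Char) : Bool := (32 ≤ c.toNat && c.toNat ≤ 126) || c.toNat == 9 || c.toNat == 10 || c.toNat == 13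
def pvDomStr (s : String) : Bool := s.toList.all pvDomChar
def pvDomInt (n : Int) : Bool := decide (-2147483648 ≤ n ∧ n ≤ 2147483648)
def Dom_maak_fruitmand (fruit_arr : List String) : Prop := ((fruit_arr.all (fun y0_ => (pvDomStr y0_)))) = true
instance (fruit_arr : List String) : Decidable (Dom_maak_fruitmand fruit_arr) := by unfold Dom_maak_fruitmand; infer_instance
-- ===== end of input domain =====

-- B replaces A's quadratic scan-with-remove/append list maintenance by a dict keyed by
-- length (last fruit per length wins) plus one sort of its values (objective: faster).

-- ===== PORT A =====
-- Python's `for element in fruitmand:` over the list it mutates: an index-based walk;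
-- remove(element) always succeeds (element was just read from the list), so the
-- `.getD mand` totality default is never used.
def pvInnerA (fruit : String) (mand : List String) (i : Nat) : List String :=
  match h : mand[i]? with
  | none => mand
  | some element =>
    if PySem.Str.len fruit = PySem.Str.len element then
      pvInnerA fruit (((PySem.List.remove? mand element).getD mand) ++ [fruit]) (i + 1)
    else
      pvInnerA fruit mand (i + 1)
termination_by mand.length - i
decreasing_by
  · have hmem : element ∈ mand := by
      have := List.getElem?_eq_some_iff.mp h
      obtain ⟨hlt, he⟩ := this
      exact he ▸ List.getElem_mem hlt
    have hlt : i < mand.length := (List.getElem?_eq_some_iff.mp h).1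
    rw [PySem.List.remove?_eq_some_erase mand element hmem]
    simp [hmem]
    omega
  · have hlt : i < mand.length := (List.getElem?_eq_some_iff.mp h).1
    omega

def maak_fruitmand (fruit_arr : List String) : List String :=
  let fruitmand := fruit_arr.foldl (fun mand fruit =>
    let m2 := pvInnerA fruit mand 0
    if fruit ∈ m2 then m2 else m2 ++ [fruit]) []
  PySem.List.sorted fruitmand (fun x => PySem.Str.len x) false

-- ===== PORT B =====
def maak_fruitmand_alt (fruit_arr : List String) : List String :=
  let laatste := fruit_arr.foldl
    (fun d fruit => d.insert (PySem.Str.len fruit) fruit)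
    (PySem.Dict.empty : PySem.Dict Int String)
  PySem.List.sorted laatste.values (fun x => PySem.Str.len x) false

-- ===== PRECONDITION & SPEC =====
def Spec_maak_fruitmand (fruit_arr : List String) (out : List String) : Prop := out = maak_fruitmand_alt fruit_arr
instance (fruit_arr : List String) (out : List String) : Decidable (Spec_maak_fruitmand fruit_arr out) := by unfold Spec_maak_fruitmand; infer_instance

-- ===== CLAIM (what is proved, stated in full; the proofs are below) =====
def Claim_equal_maak_fruitmand : Prop := ∀ (fruit_arr : List String), Dom_maak_fruitmand fruit_arr → Spec_maak_fruitmand fruit_arr (maak_fruitmand fruit_arr)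

-- ===== LEMMAS AND PROOFS =====

-- A's inner loop on a tail `m0 ++ [f]` where nothing in m0 matches f's length:
-- the only remaining match is the appended f itself, whose remove+append is a no-op.
lemma innerA_after (f : String) : ∀ (n i : Nat) (m0 : List String),
    (m0.length + 1) - i ≤ n → f ∉ m0 →
    (∀ x ∈ m0, PySem.Str.len f ≠ PySem.Str.len x) →
    pvInnerA f (m0 ++ [f]) i = m0 ++ [f] := by
  intro n
  induction n with
  | zero =>
    intro i m0 hn _ _
    have hge : (m0 ++ [f]).length ≤ i := by simp; omega
    rw [pvInnerA]
    split
    · rfl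
    · next element h => exact absurd h (by simp [List.getElem?_eq_none hge])
  | succ n ih =>
    intro i m0 hn hf hlen
    rw [pvInnerA]
    split
    · rfl
    · next element h =>
      have hlt : i < (m0 ++ [f]).length := (List.getElem?_eq_some_iff.mp h).1
      have hel : (m0 ++ [f])[i]'hlt = element := (List.getElem?_eq_some_iff.mp h).2
      by_cases hi : i < m0.length
      · -- element ∈ m0: no length match, skip
        have hem : element ∈ m0 := by
          have : (m0 ++ [f])[i]'hlt = m0[i]'hi := List.getElem_append_left hi
          rw [this] at hel
          exact hel ▸ List.getElem_mem hi
        rw [if_neg (hlen element hem)]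
        exact ih (i + 1) m0 (by omega) hf hlen
      · -- element = f: remove + append is a no-op
        have hif : i = m0.length := by simp at hlt; omega
        have helf : element = f := by
          subst hif
          have : (m0 ++ [f])[m0.length]'hlt = f := by simp
          rw [this] at hel; exact hel.symm
        rw [helf, if_pos rfl]
        have hmem : f ∈ m0 ++ [f] := by simp
        rw [PySem.List.remove?_eq_some_erase _ f hmem]
        have her : (m0 ++ [f]).erase f = m0 := by
          rw [List.erase_append_right _ hf]; simp
        rw [Option.getD_some, her]
        exact ih (i + 1) m0 (by omega) hf hlen

-- Characterisation of A's inner loop from index i, given pairwise-distinct lengths.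
lemma innerA_go (f : String) : ∀ (n i : Nat) (mand : List String),
    mand.length - i ≤ n → (mand.map PySem.Str.len).Nodup →
    pvInnerA f mand i =
      (match (mand.drop i).find? (fun e => PySem.Str.len f == PySem.Str.len e) with
       | none => mand
       | some e => mand.erase e ++ [f]) := by
  intro n
  induction n with
  | zero =>
    intro i mand hn _
    have hge : mand.length ≤ i := by omega
    rw [pvInnerA, List.drop_eq_nil_of_le hge]
    split
    · rfl
    · next element h => exact absurd h (by simp [List.getElem?_eq_none hge])
  | succ n ih =>
    intro i mand hn hnd
    rw [pvInnerA]
    split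
    · next h =>
      have hge : mand.length ≤ i := by
        by_contra hc
        exact absurd h (by simp; omega)
      rw [List.drop_eq_nil_of_le hge]
      rfl
    · next element h =>
      have hlt : i < mand.length := (List.getElem?_eq_some_iff.mp h).1
      have hel : mand[i]'hlt = element := (List.getElem?_eq_some_iff.mp h).2
      have hdrop : mand.drop i = element :: mand.drop (i + 1) := by
        rw [← List.getElem_cons_drop hlt, hel]
      have hinj : ∀ x ∈ mand, ∀ y ∈ mand, PySem.Str.len x = PySem.Str.len y → x = y :=
        fun x hx y hy => List.inj_on_of_nodup_map hnd hx hy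
      have hem : element ∈ mand := hel ▸ List.getElem_mem hlt
      by_cases hc : PySem.Str.len f = PySem.Str.len element
      · -- found the (unique) matching element: replace it, rest is a no-op
        rw [if_pos hc, hdrop]
        have hfind : (element :: mand.drop (i + 1)).find?
            (fun e => PySem.Str.len f == PySem.Str.len e) = some element :=
          List.find?_cons_of_pos (by simp [PySem.Str.len] at hc ⊢; exact_mod_cast hc)
        rw [hfind]
        rw [PySem.List.remove?_eq_some_erase _ element hem, Option.getD_some]
        have hndm : mand.Nodup := List.Nodup.of_map _ hnd
        have hlen0 : ∀ x ∈ mand.erase element, PySem.Str.len f ≠ PySem.Str.len x := by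
          intro x hx hfx
          have hx' := (List.Nodup.mem_erase_iff hndm).mp hx
          exact hx'.1 (hinj x hx'.2 element hem (hfx ▸ hc.symm ▸ (hc ▸ hfx).symm ▸ by rw [← hfx, hc]))
        have hfm : f ∉ mand.erase element := by
          intro hfx
          have hx' := (List.Nodup.mem_erase_iff hndm).mp hfx
          exact hx'.1 (hinj f hx'.2 element hem hc)
        exact innerA_after f ((mand.erase element).length + 1) (i + 1) (mand.erase element)
          (by omega) hfm hlen0
      · -- no match at this index: skip
        rw [if_neg hc, hdrop, List.find?_cons_of_neg (by simpa using hc)]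
        exact ih (i + 1) mand (by omega) hnd

-- One outer-loop step of A.
lemma stepA_char (f : String) (mand : List String) (h : (mand.map PySem.Str.len).Nodup) :
    (let m2 := pvInnerA f mand 0; if f ∈ m2 then m2 else m2 ++ [f]) =
      (match mand.find? (fun e => PySem.Str.len f == PySem.Str.len e) with
       | none => mand ++ [f]
       | some e => mand.erase e ++ [f]) := by
  have hgo := innerA_go f mand.length 0 mand (by omega) h
  rw [List.drop_zero] at hgo
  cases hfind : mand.find? (fun e => PySem.Str.len f == PySem.Str.len e) with
  | none =>
    rw [hfind] at hgo
    have hfn : f ∉ mand := by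
      intro hfm
      have := List.find?_eq_none.mp hfind f hfm
      simp at this
    show (if f ∈ pvInnerA f mand 0 then pvInnerA f mand 0 else pvInnerA f mand 0 ++ [f]) = _
    rw [hgo, if_neg hfn]
  | some e =>
    rw [hfind] at hgo
    show (if f ∈ pvInnerA f mand 0 then pvInnerA f mand 0 else pvInnerA f mand 0 ++ [f]) = _
    rw [hgo, if_pos (by simp)]

-- Length keys of the dict's values are exactly its keys.
lemma values_map_len (d : PySem.Dict Int String)
    (hv : ∀ p ∈ d.items, PySem.Str.len p.2 = p.1) :
    d.values.map PySem.Str.len = d.keys := by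
  simp only [PySem.Dict.values, PySem.Dict.keys, List.map_map]
  exact List.map_congr_left (fun p hp => hv p hp)

-- One outer-loop step preserves the permutation between A's basket and B's dict values.
lemma step_perm (f : String) (mand : List String) (d : PySem.Dict Int String)
    (hperm : mand.Perm d.values) (hk : d.keys.Nodup)
    (hv : ∀ p ∈ d.items, PySem.Str.len p.2 = p.1) :
    (let m2 := pvInnerA f mand 0; if f ∈ m2 then m2 else m2 ++ [f]).Perm
      (d.insert (PySem.Str.len f) f).values := by
  have hvk := values_map_len d hv
  have hmnd : (mand.map PySem.Str.len).Nodup := by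
    have hp : (mand.map PySem.Str.len).Perm (d.values.map PySem.Str.len) := hperm.map _
    rw [hvk] at hp
    exact hp.symm.nodup hk
  rw [stepA_char f mand hmnd]
  by_cases hcont : d.contains (PySem.Str.len f) = true
  · obtain ⟨e, he⟩ : ∃ e, d.get? (PySem.Str.len f) = some e := by
      rw [PySem.Dict.contains_eq_isSome_get?] at hcont
      exact Option.isSome_iff_exists.mp hcont
    have hitem : (PySem.Str.len f, e) ∈ d.items := PySem.Dict.mem_items_of_get?_eq_some d he
    have hlene : PySem.Str.len e = PySem.Str.len f := hv _ hitem
    have hev : e ∈ d.values := by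
      simp only [PySem.Dict.values, List.mem_map]
      exact ⟨(PySem.Str.len f, e), hitem, rfl⟩
    have hem : e ∈ mand := hperm.mem_iff.mpr hev
    have hfind : mand.find? (fun x => PySem.Str.len f == PySem.Str.len x) = some e := by
      cases hf2 : mand.find? (fun x => PySem.Str.len f == PySem.Str.len x) with
      | none => exact absurd (List.find?_eq_none.mp hf2 e hem) (by simp [PySem.Str.len] at hlene ⊢; omega)
      | some e0 =>
        have hmem0 := List.mem_of_find?_eq_some hf2
        have hp0 : PySem.Str.len f = PySem.Str.len e0 := by
          have := List.find?_some hf2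
          simpa using this
        rw [List.inj_on_of_nodup_map hmnd hmem0 hem (by rw [← hp0, hlene])]
    rw [hfind]
    obtain ⟨pre, post, hsplit⟩ := List.append_of_mem hitem
    have hkeys : d.keys = pre.map Prod.fst ++ PySem.Str.len f :: post.map Prod.fst := by
      simp [PySem.Dict.keys, hsplit]
    have hKpre : PySem.Str.len f ∉ pre.map Prod.fst := by
      rw [hkeys] at hk
      exact fun hmem => (List.nodup_append.mp hk).2.2 _ hmem _ (by simp) rfl
    have hKpost : PySem.Str.len f ∉ post.map Prod.fst := by
      rw [hkeys] at hk
      exact (List.nodup_cons.mp (List.nodup_append.mp hk).2.1).1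
    have hvals : d.values = pre.map Prod.snd ++ e :: post.map Prod.snd := by
      simp [PySem.Dict.values, hsplit]
    have hvnd : d.values.Nodup := by
      have := hvk ▸ hk
      exact List.Nodup.of_map _ this
    have hepre : e ∉ pre.map Prod.snd := by
      rw [hvals] at hvnd
      exact fun hmem => (List.nodup_append.mp hvnd).2.2 _ hmem _ (by simp) rfl
    have hmapfix : ∀ (l : List (Int × String)), PySem.Str.len f ∉ l.map Prod.fst →
        l.map (fun p => if (p.1 == PySem.Str.len f) = true then (PySem.Str.len f, f) else p)
          = l := by
      intro l hl
      induction l with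
      | nil => rfl
      | cons a t ih =>
        simp only [List.map_cons, List.mem_cons, not_or] at hl
        rw [List.map_cons, if_neg (by simp; exact fun hEq => hl.1 hEq.symm), ih hl.2]
    have hvins : (d.insert (PySem.Str.len f) f).values =
        pre.map Prod.snd ++ f :: post.map Prod.snd := by
      rw [PySem.Dict.values, PySem.Dict.items_insert_of_contains d f hcont, hsplit,
        List.map_append, List.map_cons, hmapfix pre hKpre, hmapfix post hKpost]
      simp
    have herase : d.values.erase e = pre.map Prod.snd ++ post.map Prod.snd := by
      rw [hvals, List.erase_append_right _ hepre, List.erase_cons_head]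
    rw [hvins]
    have h1 : (mand.erase e ++ [f]).Perm (d.values.erase e ++ [f]) :=
      (hperm.erase e).append_right [f]
    rw [herase] at h1
    exact h1.trans ((List.perm_append_singleton f _).trans List.perm_middle.symm)
  · have hfind : mand.find? (fun x => PySem.Str.len f == PySem.Str.len x) = none := by
      apply List.find?_eq_none.mpr
      intro x hx hbx
      have hfx : PySem.Str.len f = PySem.Str.len x := by simpa using hbx
      have hxv : x ∈ d.values := hperm.subset hx
      obtain ⟨p, hp, hpx⟩ : ∃ p ∈ d.items, p.2 = x := by
        simpa [PySem.Dict.values, List.mem_map] using hxv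
      have hp1 : p.1 = PySem.Str.len f := by rw [← hv p hp, hpx, hfx]
      have hmemk : PySem.Str.len f ∈ d.keys := by
        have : p.1 ∈ d.keys := List.mem_map_of_mem hp
        rwa [hp1] at this
      exact hcont ((PySem.Dict.contains_iff_mem_keys d _).mpr hmemk)
    rw [hfind]
    have hvins : (d.insert (PySem.Str.len f) f).values = d.values ++ [f] := by
      rw [PySem.Dict.values, PySem.Dict.items_insert_of_not_contains d f (by simpa using hcont)]
      simp [PySem.Dict.values]
    rw [hvins]
    exact hperm.append_right [f]

-- Invariant carried through both folds.
lemma fold_invariant : ∀ (l : List String) (mand : List String) (d : PySem.Dict Int String),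
    mand.Perm d.values → d.keys.Nodup → (∀ p ∈ d.items, PySem.Str.len p.2 = p.1) →
    (l.foldl (fun mand fruit =>
        let m2 := pvInnerA fruit mand 0
        if fruit ∈ m2 then m2 else m2 ++ [fruit]) mand).Perm
      (l.foldl (fun d fruit => d.insert (PySem.Str.len fruit) fruit) d).values ∧
    (l.foldl (fun d fruit => d.insert (PySem.Str.len fruit) fruit) d).keys.Nodup ∧
    (∀ p ∈ (l.foldl (fun d fruit => d.insert (PySem.Str.len fruit) fruit) d).items,
      PySem.Str.len p.2 = p.1) := by
  intro l
  induction l with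
  | nil => exact fun mand d hperm hk hv => ⟨hperm, hk, hv⟩
  | cons f l ih =>
    intro mand d hperm hk hv
    simp only [List.foldl_cons]
    exact ih _ _ (step_perm f mand d hperm hk hv)
      (PySem.Dict.nodup_keys_insert d _ f hk)
      (fun p hp => by
        rcases (PySem.Dict.mem_items_insert d _ f p).mp hp with h1 | h2
        · rw [h1]
        · exact hv p h2.1)

-- ===== VERDICT (by name: the statement is the Claim_ definition above) =====
theorem maak_fruitmand_spec : Claim_equal_maak_fruitmand := by
  intro fruit_arr _
  simp only [Spec_maak_fruitmand, maak_fruitmand, maak_fruitmand_alt]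
  obtain ⟨hperm, hk, hv⟩ := fold_invariant fruit_arr [] PySem.Dict.empty
    (by simp [PySem.Dict.empty, PySem.Dict.values])
    (by simp [PySem.Dict.empty, PySem.Dict.keys])
    (by simp [PySem.Dict.empty])
  have hvk := values_map_len _ hv
  have hvnd : ((fruit_arr.foldl (fun d fruit => d.insert (PySem.Str.len fruit) fruit)
      PySem.Dict.empty).values.map PySem.Str.len).Nodup := hvk ▸ hk
  have hysperm := PySem.List.sorted_perm
    (fruit_arr.foldl (fun d fruit => d.insert (PySem.Str.len fruit) fruit)
      PySem.Dict.empty).values (fun x => PySem.Str.len x) false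
  have hle := PySem.List.sorted_pairwise
    (fruit_arr.foldl (fun d fruit => d.insert (PySem.Str.len fruit) fruit)
      PySem.Dict.empty).values (fun x => PySem.Str.len x)
  have hne := List.pairwise_map.mp ((hysperm.map PySem.Str.len).symm.nodup hvnd)
  have hlt := (hle.and hne).imp
    (fun h => lt_of_le_of_ne h.1 h.2)
  exact PySem.List.sorted_eq_of_perm_of_pairwise_lt _ _ _ (hysperm.trans hperm.symm) hlt
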